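-- pv_equiv track=rewrite | github.com/BakitD/Codility | 12/commonPrime.py | solution
-- ===== SOURCE A (Python) =====
-- def primarily(n):
--     i = 2
--     while(i * i <= n):
--         if n % i == 0:
--             return False
--         i += 1
--     return True
--
-- def solution(A, B):
--     total = 0
--     for a, b in zip(A, B):
--         if a == b:
--             total += 1
--             continue
--         if a < 5 and b < 5 and a != b:
--             continue
--         if a != b and primarily(a) and primarily(b):
--             continue
--
--         i = 2
--         first = set()
--         second = set()
--         maxOf = max(a, b)
--
--         while (i * i <= maxOf):
--             if primarily(i):
--                 if i <= a and a % i == 0: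
--                     first.add(i)
--                 if i <= b and b % i == 0:
--                     second.add(i)
--             i += 1
--         #if a % b == 0: first.add(b)
--         #if b % a == 0: second.add(a)
--
--         if  len(first) and len(second) and len(first - second) == 0 and len(second - first) == 0:
--             total += 1
--
--     return total
-- ===== SOURCE B (Python) =====
-- def _small_prime_factors(n, cap):
--     # Increasing list of the prime factors p of n with p*p <= cap,
--     # found by dividing factors out (no per-candidate primality test).
--     res = []
--     d = 2
--     while d * d <= n and d * d <= cap:
--         if n % d == 0:
--             res.append(d)
--             while n % d == 0:
--                 n //= d
--         d += 1
--     if n > 1 and n * n <= cap: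
--         res.append(n)
--     return res
--
--
-- def solution(A, B):
--     total = 0
--     for a, b in zip(A, B):
--         if a == b:
--             total += 1
--         elif a < 5 and b < 5:
--             continue
--         else:
--             cap = a if a > b else b
--             fa = _small_prime_factors(a, cap)
--             fb = _small_prime_factors(b, cap)
--             if fa and fa == fb:
--                 total += 1
--     return total
-- ===== Notes on version B (the rewrite author's own statement) =====
-- stated objective: faster
-- what changed: Per pair, instead of scanning every i up to sqrt(max(a,b)) and running a trial-division primality test on each candidate (plus separate primality pre-tests of a and b), B factorizes each number once by dividing out each found divisor, collecting its prime factors p with p*p <= max(a,b) directly as a sorted list, and compares the two lists.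
import Mathlib
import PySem

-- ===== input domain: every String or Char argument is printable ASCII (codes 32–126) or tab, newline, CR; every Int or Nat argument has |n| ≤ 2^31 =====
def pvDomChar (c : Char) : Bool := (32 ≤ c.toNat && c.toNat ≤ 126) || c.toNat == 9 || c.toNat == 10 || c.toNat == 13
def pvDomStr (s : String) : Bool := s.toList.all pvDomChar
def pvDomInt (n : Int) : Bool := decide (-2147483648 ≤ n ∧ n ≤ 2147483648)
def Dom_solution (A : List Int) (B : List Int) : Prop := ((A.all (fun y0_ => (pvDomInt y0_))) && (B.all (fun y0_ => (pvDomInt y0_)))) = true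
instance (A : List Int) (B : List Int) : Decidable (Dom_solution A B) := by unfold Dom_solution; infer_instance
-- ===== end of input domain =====

-- B replaces A's per-candidate trial-division primality test inside the sqrt scan by a single
-- trial-division factorization per number (dividing each found factor out), collecting the prime
-- factors p with p*p <= max(a,b) as a sorted list; measured faster in a timing run.

-- ===== PORT A =====
def primGo (i n : Int) : Bool :=
  if h : i * i ≤ n then
    if PySem.Int.mod n i = 0 then false else primGo (i+1) n
  else true
termination_by (n + 1 - i).toNat
decreasing_by
  have hin : i ≤ n := by nlinarith [mul_self_nonneg i, sq_nonneg (i-1)]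
  omega

def primarily (n : Int) : Bool := primGo 2 n

def pairGo (a b maxOf i : Int) (first second : PySem.Set Int) : PySem.Set Int × PySem.Set Int :=
  if h : i * i ≤ maxOf then
    if primarily i then
      pairGo a b maxOf (i+1)
        (if i ≤ a ∧ PySem.Int.mod a i = 0 then PySem.Set.add first i else first)
        (if i ≤ b ∧ PySem.Int.mod b i = 0 then PySem.Set.add second i else second)
    else pairGo a b maxOf (i+1) first second
  else (first, second)
termination_by (maxOf + 1 - i).toNat
decreasing_by
  all_goals
    have hin : i ≤ maxOf := by nlinarith [mul_self_nonneg i, sq_nonneg (i-1)]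
    omega

def solution (A : List Int) (B : List Int) : Int :=
  (A.zip B).foldl (fun total p =>
    let a := p.1; let b := p.2
    if a = b then total + 1
    else if a < 5 ∧ b < 5 ∧ a ≠ b then total
    else if a ≠ b ∧ primarily a ∧ primarily b then total
    else
      let maxOf := max a b
      let fs := pairGo a b maxOf 2 PySem.Set.empty PySem.Set.empty
      if PySem.Set.len fs.1 ≠ 0 ∧ PySem.Set.len fs.2 ≠ 0 ∧
         PySem.Set.len (PySem.Set.diff fs.1 fs.2) = 0 ∧ PySem.Set.len (PySem.Set.diff fs.2 fs.1) = 0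
      then total + 1 else total) 0

-- ===== PORT B =====
def stripFac (d n : Int) : Int :=
  -- guard '1 < d ∧ 0 < n' is for termination only; it holds at every call site reached by the Python loop
  if h : 1 < d ∧ 0 < n ∧ PySem.Int.mod n d = 0 then stripFac d (PySem.Int.floordiv n d) else n
termination_by n.toNat
decreasing_by
  rw [PySem.Int.floordiv_eq_ediv_of_pos (by omega)]
  have hme := Int.mul_ediv_add_emod n d
  have hr := Int.emod_nonneg n (by omega : d ≠ 0)
  have hq := Int.ediv_nonneg (le_of_lt h.2.1) (by omega : (0:Int) ≤ d)
  have : n / d < n := by nlinarith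
  omega

def facGo (n cap d : Int) (res : List Int) : List Int :=
  if h : d * d ≤ n ∧ d * d ≤ cap then
    if PySem.Int.mod n d = 0 then
      facGo (stripFac d n) cap (d + 1) (res ++ [d])
    else facGo n cap (d + 1) res
  else if 1 < n ∧ n * n ≤ cap then res ++ [n] else res
termination_by (cap + 1 - d).toNat
decreasing_by
  all_goals
    have hin : d ≤ cap := by nlinarith [mul_self_nonneg d, sq_nonneg (d-1)]
    omega

def smallPrimeFactors (n cap : Int) : List Int := facGo n cap 2 []

def solution_alt (A : List Int) (B : List Int) : Int :=
  (A.zip B).foldl (fun total p =>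
    if p.1 = p.2 then total + 1
    else if p.1 < 5 ∧ p.2 < 5 then total
    else
      let cap := if p.1 > p.2 then p.1 else p.2
      let fa := smallPrimeFactors p.1 cap
      let fb := smallPrimeFactors p.2 cap
      if fa ≠ [] ∧ fa = fb then total + 1 else total) 0




-- ===== PRECONDITION & SPEC =====
def Spec_solution (A : List Int) (B : List Int) (out : Int) : Prop := out = solution_alt A B
instance (A : List Int) (B : List Int) (out : Int) : Decidable (Spec_solution A B out) := by unfold Spec_solution; infer_instance

-- ===== CLAIM (what is proved, stated in full; the proofs are below) =====
def Claim_equal_solution : Prop := ∀ (A : List Int) (B : List Int), Dom_solution A B → Spec_solution A B (solution A B)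

-- ===== LEMMAS AND PROOFS =====

def Qp (a cap p : Int) : Prop :=
  2 ≤ p ∧ p * p ≤ cap ∧ primarily p = true ∧ p ≤ a ∧ p ∣ a

theorem primGo_char (i n : Int) (hi : 2 ≤ i) :
    (primGo i n = true ↔ ∀ j, i ≤ j → j*j ≤ n → ¬ j ∣ n) := by
  fun_induction primGo i n with
  | case1 i hle hmod =>
    simp only [Bool.false_eq_true, false_iff]
    intro h
    exact h i (le_refl i) hle ((PySem.Int.mod_eq_zero_iff_dvd _ _).mp hmod)
  | case2 i hle hmod ih =>
    rw [ih (by omega)]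
    constructor
    · intro h j hij hj2
      rcases eq_or_lt_of_le hij with rfl | hlt
      · exact fun hd => hmod ((PySem.Int.mod_eq_zero_iff_dvd _ _).mpr hd)
      · exact h j (by omega) hj2
    · intro h j hij hj2
      exact h j (by omega) hj2
  | case3 i hle =>
    simp only [true_iff]
    intro j hij hj2 _
    have : i * i ≤ j * j := by nlinarith
    omega

theorem primarily_char (n : Int) :
    (primarily n = true ↔ ∀ j, 2 ≤ j → j*j ≤ n → ¬ j ∣ n) :=
  primGo_char 2 n (le_refl 2)

theorem primarily_prime (n : Int) (h2 : 2 ≤ n) (hp : primarily n = true) : Prime n := by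
  have hc := (primarily_char n).mp hp
  have h0 : (0:Int) ≤ n := by omega
  lift n to ℕ using h0 with m
  rw [← Nat.prime_iff_prime_int]
  rw [Nat.prime_def_le_sqrt]
  refine ⟨by exact_mod_cast h2, fun k hk hks hd => ?_⟩
  have hkk : k * k ≤ m := by nlinarith [Nat.le_sqrt'.mp hks]
  exact hc (k : Int) (by exact_mod_cast hk) (by exact_mod_cast hkk) (by exact_mod_cast hd)

theorem strip_spec (d n : Int) (hd : 2 ≤ d) (hn : 1 ≤ n) :
    1 ≤ stripFac d n ∧ stripFac d n ∣ n ∧ ¬ d ∣ stripFac d n ∧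
      ∀ q : Int, Prime q → ¬ q ∣ d → q ∣ n → q ∣ stripFac d n := by
  fun_induction stripFac d n with
  | case1 n h ih =>
    have hdvd : d ∣ n := (PySem.Int.mod_eq_zero_iff_dvd _ _).mp h.2.2
    have hfd : PySem.Int.floordiv n d = n / d := PySem.Int.floordiv_eq_ediv_of_pos (by omega)
    have hmul : n / d * d = n := Int.ediv_mul_cancel hdvd
    have hdn : d ≤ n := Int.le_of_dvd (by omega) hdvd
    have h1 : (1:Int) ≤ n / d := by
      rw [Int.le_ediv_iff_mul_le (by omega : (0:Int) < d)]; omega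
    rw [hfd] at ih ⊢
    obtain ⟨ih1, ih2, ih3, ih4⟩ := ih h1
    refine ⟨ih1, ih2.trans ⟨d, hmul.symm⟩, ih3, fun q hq hqd hqn => ?_⟩
    refine ih4 q hq hqd ?_
    have : q ∣ d * (n / d) := by rw [mul_comm, hmul]; exact hqn
    exact (hq.dvd_mul.mp this).resolve_left hqd
  | case2 n h =>
    have hnd : ¬ d ∣ n := by
      intro hdvd
      exact h ⟨by omega, by omega, (PySem.Int.mod_eq_zero_iff_dvd _ _).mpr hdvd⟩
    exact ⟨hn, dvd_refl n, hnd, fun q _ _ hqn => hqn⟩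

theorem facGo_spec (a cap : Int) (ha : 1 ≤ a) (n d : Int) (res : List Int)
    (hd : 2 ≤ d) (hn : 1 ≤ n) (hna : n ∣ a)
    (hsmall : ∀ i, 2 ≤ i → i < d → ¬ i ∣ n)
    (hrem : ∀ p, Qp a cap p → d ≤ p → p ∣ n)
    (hres : ∀ p, p ∈ res ↔ (Qp a cap p ∧ p < d))
    (hpw : res.Pairwise (· < ·)) :
    (∀ p, p ∈ facGo n cap d res ↔ Qp a cap p) ∧ (facGo n cap d res).Pairwise (· < ·) := by
  fun_induction facGo n cap d res with
  | case1 n d res h hmod ih =>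
    have hdd : d ∣ n := (PySem.Int.mod_eq_zero_iff_dvd _ _).mp hmod
    have hda : d ∣ a := hdd.trans hna
    have hdprim : primarily d = true := by
      rw [primarily_char]
      intro j hj2 hjd hjdvd
      have hjltd : j < d := by nlinarith
      exact hsmall j hj2 hjltd (hjdvd.trans hdd)
    have hQd : Qp a cap d := ⟨hd, h.2, hdprim, Int.le_of_dvd (by omega) hda, hda⟩
    obtain ⟨hs1, hs2, hs3, hs4⟩ := strip_spec d n hd hn
    refine ih (by omega) hs1 (hs2.trans hna) ?_ ?_ ?_ ?_
    · intro i hi2 hi hidvd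
      rcases lt_or_eq_of_le (by omega : i ≤ d) with hlt | rfl
      · exact hsmall i hi2 hlt (hidvd.trans hs2)
      · exact hs3 hidvd
    · intro p hQ hdp
      have hpprime : Prime p := primarily_prime p hQ.1 hQ.2.2.1
      have hpnd : ¬ p ∣ d := fun hpd => by
        have := Int.le_of_dvd (by omega) hpd; omega
      exact hs4 p hpprime hpnd (hrem p hQ (by omega))
    · intro p
      simp only [List.mem_append, List.mem_singleton, hres]
      constructor
      · rintro (⟨hQ, hlt⟩ | rfl)
        · exact ⟨hQ, by omega⟩
        · exact ⟨hQd, by omega⟩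
      · rintro ⟨hQ, hlt⟩
        rcases lt_or_eq_of_le (by omega : p ≤ d) with hlt' | rfl
        · exact Or.inl ⟨hQ, hlt'⟩
        · exact Or.inr rfl
    · rw [List.pairwise_append]
      exact ⟨hpw, List.pairwise_singleton _ _, fun x hx y hy => by
        rw [List.mem_singleton] at hy
        subst hy
        exact ((hres x).mp hx).2⟩
  | case2 n d res h hmod ih =>
    have hnd : ¬ d ∣ n := fun hdvd => hmod ((PySem.Int.mod_eq_zero_iff_dvd _ _).mpr hdvd)
    refine ih (by omega) hn hna ?_ ?_ ?_ hpw
    · intro i hi2 hi hidvd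
      rcases lt_or_eq_of_le (by omega : i ≤ d) with hlt | rfl
      · exact hsmall i hi2 hlt hidvd
      · exact hnd hidvd
    · intro p hQ hdp
      exact hrem p hQ (by omega)
    · intro p
      rw [hres]
      constructor
      · rintro ⟨hQ, hlt⟩; exact ⟨hQ, by omega⟩
      · rintro ⟨hQ, hlt⟩
        refine ⟨hQ, ?_⟩
        rcases lt_or_eq_of_le (by omega : p ≤ d) with hlt' | rfl
        · exact hlt'
        · exact absurd (hrem p hQ (le_refl p)) hnd
  | case3 n d res h hcond =>
    -- leftover n is appended: 1 < n ∧ n * n ≤ cap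
    have hcase : n < d * d := by
      by_contra hge
      push_neg at hge
      have hnc : ¬ d * d ≤ cap := fun hc => h ⟨hge, hc⟩
      nlinarith [hcond.1, hcond.2]
    have hstep : ∀ p, Qp a cap p → d ≤ p → p = n := by
      intro p hQ hdp
      have hpn : p ∣ n := hrem p hQ hdp
      have hple : p ≤ n := Int.le_of_dvd (by omega) hpn
      by_contra hne
      have hplt : p < n := by omega
      have hp0 : (0:Int) < p := by have := hQ.1; omega
      obtain ⟨m, hm⟩ := hpn
      have hm2 : 2 ≤ m := by nlinarith
      have hmd : m < d := by nlinarith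
      exact hsmall m hm2 hmd ⟨p, by rw [hm]; ring⟩
    have hprimn : primarily n = true := by
      rw [primarily_char]
      intro j hj2 hjn hjdvd
      have hjltd : j < d := by nlinarith
      exact hsmall j hj2 hjltd hjdvd
    have hQn : Qp a cap n := ⟨by omega, hcond.2, hprimn, Int.le_of_dvd (by omega) hna, hna⟩
    have hdn : d ≤ n := by
      by_contra hlt
      exact hsmall n (by omega) (by omega) (dvd_refl n)
    constructor
    · intro p
      simp only [List.mem_append, List.mem_singleton, hres]
      constructor
      · rintro (⟨hQ, _⟩ | rfl)
        · exact hQ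
        · exact hQn
      · intro hQ
        rcases lt_or_ge p d with hlt | hge
        · exact Or.inl ⟨hQ, hlt⟩
        · exact Or.inr (hstep p hQ hge)
    · rw [List.pairwise_append]
      exact ⟨hpw, List.pairwise_singleton _ _, fun x hx y hy => by
        rw [List.mem_singleton] at hy
        subst hy
        have := ((hres x).mp hx).2
        omega⟩
  | case4 n d res h hcond =>
    refine ⟨fun p => (hres p).trans ⟨fun h' => h'.1, fun hQ => ⟨hQ, ?_⟩⟩, hpw⟩
    by_contra hge
    push_neg at hge
    by_cases hcase : d * d ≤ n
    · have hnocap : ¬ d * d ≤ cap := fun hc => h ⟨hcase, hc⟩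
      have h1 : d * d ≤ p * p := by nlinarith [hQ.1]
      have h2 := hQ.2.1
      omega
    · push_neg at hcase
      by_cases hn2 : 1 < n
      · have hstep : ∀ q, Qp a cap q → d ≤ q → q = n := by
          intro q hQ' hdq
          have hqn : q ∣ n := hrem q hQ' hdq
          have hqle : q ≤ n := Int.le_of_dvd (by omega) hqn
          by_contra hne
          have hqlt : q < n := by omega
          have hq0 : (0:Int) < q := by have := hQ'.1; omega
          obtain ⟨m, hm⟩ := hqn
          have hm2 : 2 ≤ m := by nlinarith
          have hmd : m < d := by nlinarith
          exact hsmall m hm2 hmd ⟨q, by rw [hm]; ring⟩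
        have hpn := hstep p hQ hge
        subst hpn
        exact hcond ⟨hn2, hQ.2.1⟩
      · have hn1 : n = 1 := by omega
        subst hn1
        have h1 := Int.le_of_dvd (by omega) (hrem p hQ hge)
        have h2 := hQ.1
        omega

theorem spf_spec (a cap : Int) :
    (∀ p, p ∈ smallPrimeFactors a cap ↔ Qp a cap p) ∧
      (smallPrimeFactors a cap).Pairwise (· < ·) := by
  by_cases ha : 1 ≤ a
  · exact facGo_spec a cap ha a 2 []
      (le_refl 2) ha (dvd_refl a)
      (fun i hi2 hi => by omega)
      (fun p hQ _ => hQ.2.2.2.2)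
      (fun p => ⟨fun hmem => (List.not_mem_nil hmem).elim,
        fun hcon => absurd hcon.2 (by have := hcon.1.1; omega)⟩)
      (List.Pairwise.nil)
  · have hfac : smallPrimeFactors a cap = [] := by
      rw [smallPrimeFactors, facGo]
      rw [dif_neg (by rintro ⟨h1, h2⟩; omega), if_neg (by rintro ⟨h1, h2⟩; omega)]
    rw [hfac]
    refine ⟨fun p => ⟨fun h => absurd h (List.not_mem_nil), fun hQ => ?_⟩, List.Pairwise.nil⟩
    have h1 := hQ.1
    have h2 := hQ.2.2.2.1
    omega

theorem side_step (x maxOf i : Int) (hguard : i * i ≤ maxOf) (hprim : primarily i = true)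
    (f : PySem.Set Int) (p : Int) :
    ((p ∈ (if i ≤ x ∧ PySem.Int.mod x i = 0 then PySem.Set.add f i else f)) ∨
        (i + 1 ≤ p ∧ p * p ≤ maxOf ∧ primarily p = true ∧ p ≤ x ∧ p ∣ x))
      ↔ (p ∈ f ∨ (i ≤ p ∧ p * p ≤ maxOf ∧ primarily p = true ∧ p ≤ x ∧ p ∣ x)) := by
  split_ifs with hc
  · rw [PySem.Set.mem_add]
    constructor
    · rintro ((hf | rfl) | ⟨h1, h2, h3, h4, h5⟩)
      · exact Or.inl hf
      · exact Or.inr ⟨le_refl p, hguard, hprim, hc.1, (PySem.Int.mod_eq_zero_iff_dvd _ _).mp hc.2⟩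
      · exact Or.inr ⟨by omega, h2, h3, h4, h5⟩
    · rintro (hf | ⟨h1, h2, h3, h4, h5⟩)
      · exact Or.inl (Or.inl hf)
      · rcases eq_or_lt_of_le h1 with rfl | hlt
        · exact Or.inl (Or.inr rfl)
        · exact Or.inr ⟨by omega, h2, h3, h4, h5⟩
  · constructor
    · rintro (hf | ⟨h1, h2, h3, h4, h5⟩)
      · exact Or.inl hf
      · exact Or.inr ⟨by omega, h2, h3, h4, h5⟩
    · rintro (hf | ⟨h1, h2, h3, h4, h5⟩)
      · exact Or.inl hf
      · rcases eq_or_lt_of_le h1 with rfl | hlt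
        · exact absurd ⟨h4, (PySem.Int.mod_eq_zero_iff_dvd _ _).mpr h5⟩ hc
        · exact Or.inr ⟨by omega, h2, h3, h4, h5⟩

theorem pairGo_mem (a b maxOf i : Int) (f s : PySem.Set Int) (hi : 2 ≤ i) :
    (∀ p, p ∈ (pairGo a b maxOf i f s).1 ↔
        (p ∈ f ∨ (i ≤ p ∧ p * p ≤ maxOf ∧ primarily p = true ∧ p ≤ a ∧ p ∣ a))) ∧
      (∀ p, p ∈ (pairGo a b maxOf i f s).2 ↔
        (p ∈ s ∨ (i ≤ p ∧ p * p ≤ maxOf ∧ primarily p = true ∧ p ≤ b ∧ p ∣ b))) := by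
  fun_induction pairGo a b maxOf i f s with
  | case1 i f s hle hprim ih =>
    obtain ⟨ih1, ih2⟩ := ih (by omega)
    exact ⟨fun p => (ih1 p).trans (side_step a maxOf i hle hprim f p),
           fun p => (ih2 p).trans (side_step b maxOf i hle hprim s p)⟩
  | case2 i f s hle hprim ih =>
    obtain ⟨ih1, ih2⟩ := ih (by omega)
    rw [Bool.not_eq_true] at hprim
    constructor
    · intro p
      rw [ih1 p]
      constructor
      · rintro (hf | ⟨h1, h2, h3, h4, h5⟩)
        · exact Or.inl hf
        · exact Or.inr ⟨by omega, h2, h3, h4, h5⟩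
      · rintro (hf | ⟨h1, h2, h3, h4, h5⟩)
        · exact Or.inl hf
        · rcases eq_or_lt_of_le h1 with rfl | hlt
          · rw [hprim] at h3; exact absurd h3 (by simp)
          · exact Or.inr ⟨by omega, h2, h3, h4, h5⟩
    · intro p
      rw [ih2 p]
      constructor
      · rintro (hf | ⟨h1, h2, h3, h4, h5⟩)
        · exact Or.inl hf
        · exact Or.inr ⟨by omega, h2, h3, h4, h5⟩
      · rintro (hf | ⟨h1, h2, h3, h4, h5⟩)
        · exact Or.inl hf
        · rcases eq_or_lt_of_le h1 with rfl | hlt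
          · rw [hprim] at h3; exact absurd h3 (by simp)
          · exact Or.inr ⟨by omega, h2, h3, h4, h5⟩
  | case3 i f s hle =>
    constructor
    · intro p
      simp only [iff_self_or]
      rintro ⟨h1, h2, _, _, _⟩
      exact absurd h2 (by nlinarith)
    · intro p
      simp only [iff_self_or]
      rintro ⟨h1, h2, _, _, _⟩
      exact absurd h2 (by nlinarith)

theorem set_len_eq (l : List Int) : PySem.Set.len l = (l.length : Int) := rfl

theorem mem_first (a b cap : Int) (p : Int) :
    p ∈ (pairGo a b cap 2 [] []).1 ↔ Qp a cap p := by
  rw [((pairGo_mem a b cap 2 [] [] (le_refl 2)).1 p)]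
  simp only [List.not_mem_nil, false_or]
  rfl

theorem mem_second (a b cap : Int) (p : Int) :
    p ∈ (pairGo a b cap 2 [] []).2 ↔ Qp b cap p := by
  rw [((pairGo_mem a b cap 2 [] [] (le_refl 2)).2 p)]
  simp only [List.not_mem_nil, false_or]
  rfl

theorem spf_eq_iff (a b cap : Int) :
    smallPrimeFactors a cap = smallPrimeFactors b cap ↔
      (∀ p, Qp a cap p ↔ Qp b cap p) := by
  obtain ⟨hma, hpa⟩ := spf_spec a cap
  obtain ⟨hmb, hpb⟩ := spf_spec b cap
  constructor
  · intro heq p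
    rw [← hma, ← hmb, heq]
  · intro hiff
    have hperm : (smallPrimeFactors a cap).Perm (smallPrimeFactors b cap) := by
      rw [List.perm_ext_iff_of_nodup (List.Pairwise.nodup hpa) (List.Pairwise.nodup hpb)]
      intro p
      rw [hma, hmb]
      exact hiff p
    exact List.Perm.eq_of_pairwise (fun x y _ _ hxy hyx => by omega) hpa hpb hperm

theorem spf_ne_nil_iff (a b cap : Int) :
    smallPrimeFactors a cap ≠ [] ↔ ∃ p, Qp a cap p := by
  obtain ⟨hma, _⟩ := spf_spec a cap
  constructor
  · intro hne
    obtain ⟨p, hp⟩ := List.exists_mem_of_ne_nil _ hne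
    exact ⟨p, (hma p).mp hp⟩
  · rintro ⟨p, hp⟩
    exact List.ne_nil_of_mem ((hma p).mpr hp)

theorem diff_len_zero_iff (f s : PySem.Set Int) :
    PySem.Set.len (PySem.Set.diff f s) = 0 ↔ ∀ p ∈ f, p ∈ s := by
  rw [set_len_eq]
  constructor
  · intro h p hp
    have hnil : PySem.Set.diff f s = [] := by
      have : (PySem.Set.diff f s).length = 0 := by exact_mod_cast h
      exact List.length_eq_zero_iff.mp this
    by_contra hns
    have : p ∈ PySem.Set.diff f s := (PySem.Set.mem_diff f s p).mpr ⟨hp, hns⟩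
    rw [hnil] at this
    exact List.not_mem_nil this
  · intro h
    have hnil : PySem.Set.diff f s = [] := by
      rw [List.eq_nil_iff_forall_not_mem]
      intro p hp
      obtain ⟨h1, h2⟩ := (PySem.Set.mem_diff f s p).mp hp
      exact h2 (h p h1)
    rw [hnil]
    rfl

theorem len_ne_zero_iff (f : PySem.Set Int) :
    PySem.Set.len f ≠ 0 ↔ ∃ p, p ∈ f := by
  rw [set_len_eq]
  constructor
  · intro h
    rcases f with _ | ⟨x, xs⟩
    · exact absurd rfl h
    · exact ⟨x, List.mem_cons_self⟩
  · rintro ⟨p, hp⟩ h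
    have : f.length = 0 := by exact_mod_cast h
    rw [List.length_eq_zero_iff.mp this] at hp
    exact List.not_mem_nil hp

theorem prim_skip (a b : Int) (hpa : primarily a = true) (hpb : primarily b = true) :
    ¬(smallPrimeFactors a (max a b) ≠ [] ∧
        smallPrimeFactors a (max a b) = smallPrimeFactors b (max a b)) := by
  rintro ⟨hne, heq⟩
  rcases le_total a b with h | h
  · have hcap : max a b = b := max_eq_right h
    have hb : smallPrimeFactors b (max a b) = [] := by
      rw [List.eq_nil_iff_forall_not_mem]
      intro p hp
      have hQ := ((spf_spec b (max a b)).1 p).mp hp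
      exact (primarily_char b).mp hpb p hQ.1 (hcap ▸ hQ.2.1) hQ.2.2.2.2
    rw [heq, hb] at hne
    exact hne rfl
  · have hcap : max a b = a := max_eq_left h
    have ha : smallPrimeFactors a (max a b) = [] := by
      rw [List.eq_nil_iff_forall_not_mem]
      intro p hp
      have hQ := ((spf_spec a (max a b)).1 p).mp hp
      exact (primarily_char a).mp hpa p hQ.1 (hcap ▸ hQ.2.1) hQ.2.2.2.2
    exact hne ha

theorem cond_iff (a b cap : Int) :
    (PySem.Set.len (pairGo a b cap 2 [] []).1 ≠ 0 ∧ PySem.Set.len (pairGo a b cap 2 [] []).2 ≠ 0 ∧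
        PySem.Set.len (PySem.Set.diff (pairGo a b cap 2 [] []).1 (pairGo a b cap 2 [] []).2) = 0 ∧
        PySem.Set.len (PySem.Set.diff (pairGo a b cap 2 [] []).2 (pairGo a b cap 2 [] []).1) = 0)
      ↔ (smallPrimeFactors a cap ≠ [] ∧ smallPrimeFactors a cap = smallPrimeFactors b cap) := by
  rw [len_ne_zero_iff, len_ne_zero_iff, diff_len_zero_iff, diff_len_zero_iff,
    spf_ne_nil_iff a b cap, spf_eq_iff]
  constructor
  · rintro ⟨⟨p, hp⟩, ⟨q, hq⟩, h12, h21⟩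
    refine ⟨⟨p, (mem_first a b cap p).mp hp⟩, fun r => ⟨fun hr => ?_, fun hr => ?_⟩⟩
    · exact (mem_second a b cap r).mp (h12 r ((mem_first a b cap r).mpr hr))
    · exact (mem_first a b cap r).mp (h21 r ((mem_second a b cap r).mpr hr))
  · rintro ⟨⟨p, hp⟩, hiff⟩
    refine ⟨⟨p, (mem_first a b cap p).mpr hp⟩, ⟨p, (mem_second a b cap p).mpr ((hiff p).mp hp)⟩,
      fun r hr => ?_, fun r hr => ?_⟩
    · exact (mem_second a b cap r).mpr ((hiff r).mp ((mem_first a b cap r).mp hr))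
    · exact (mem_first a b cap r).mpr ((hiff r).mpr ((mem_second a b cap r).mp hr))

theorem solutions_eq (A B : List Int) : solution A B = solution_alt A B := by
  rw [solution, solution_alt]
  refine List.foldl_ext _ _ 0 ?_
  intro t q _
  rcases q with ⟨a, b⟩
  dsimp only
  by_cases hab : a = b
  · rw [if_pos hab, if_pos hab]
  · rw [if_neg hab, if_neg hab]
    by_cases h5 : a < 5 ∧ b < 5
    · rw [if_pos ⟨h5.1, h5.2, hab⟩, if_pos h5]
    · rw [if_neg (fun hc => h5 ⟨hc.1, hc.2.1⟩), if_neg h5]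
      have hcap : (if a > b then a else b) = max a b := by
        by_cases hgt : a > b
        · rw [if_pos hgt, max_eq_left (le_of_lt hgt)]
        · rw [if_neg hgt, max_eq_right (by omega : a ≤ b)]
      rw [hcap]
      by_cases hprim : primarily a = true ∧ primarily b = true
      · rw [if_pos ⟨hab, hprim.1, hprim.2⟩, if_neg (prim_skip a b hprim.1 hprim.2)]
      · rw [if_neg (fun hc => hprim ⟨hc.2.1, hc.2.2⟩)]
        exact if_congr (cond_iff a b (max a b)) rfl rfl

-- ===== VERDICT (by name: the statement is the Claim_ definition above) =====
theorem solution_spec : Claim_equal_solution := by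
  intro A B _
  unfold Spec_solution
  exact solutions_eq A B
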